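-- pv_equiv track=rewrite | github.com/zamanfardin/Explainable-Phishing-Detection-BERT | Code/Unified Code.py | make_feature_names
-- ===== SOURCE A (Python) =====
-- def make_feature_names(n_features):
--     """
--     Label embedding dimensions meaningfully:
--     - Dims 0-767    → BERT dim 0 ... BERT dim 767
--     - Dims 768-1535 → DistilBERT dim 0 ... DistilBERT dim 767
--     """
--     names = []
--     for i in range(n_features):
--         if i < 768:
--             names.append(f'BERT dim {i}')
--         else:
--             names.append(f'DistilBERT dim {i - 768}')
--     return names
-- ===== SOURCE B (Python) =====
-- def make_feature_names(n_features):
--     # Table-driven: a segment table (prefix, lo, hi) drives a generic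
--     # expander that walks each segment's slice of the index range with an
--     # explicit cursor and emits labels through a shared formatting helper.
--     segments = (('BERT', 0, 768), ('DistilBERT', 768, None))
--     def label(prefix, k):
--         return '{} dim {}'.format(prefix, k)
--     names = []
--     for prefix, lo, hi in segments:
--         end = n_features if hi is None else min(hi, n_features)
--         i = lo
--         while i < end:
--             names.append(label(prefix, i - lo))
--             i += 1
--     return names
-- ===== Notes on version B (the rewrite author's own statement) =====
-- stated objective: alternative
-- what changed: Replaces the per-element index branch with a data-driven design: a segment table (prefix, lo, hi) and a generic expander that walks each segment's slice of the range with an explicit cursor and a shared label-formatting helper; no conditional per element.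
import Mathlib
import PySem

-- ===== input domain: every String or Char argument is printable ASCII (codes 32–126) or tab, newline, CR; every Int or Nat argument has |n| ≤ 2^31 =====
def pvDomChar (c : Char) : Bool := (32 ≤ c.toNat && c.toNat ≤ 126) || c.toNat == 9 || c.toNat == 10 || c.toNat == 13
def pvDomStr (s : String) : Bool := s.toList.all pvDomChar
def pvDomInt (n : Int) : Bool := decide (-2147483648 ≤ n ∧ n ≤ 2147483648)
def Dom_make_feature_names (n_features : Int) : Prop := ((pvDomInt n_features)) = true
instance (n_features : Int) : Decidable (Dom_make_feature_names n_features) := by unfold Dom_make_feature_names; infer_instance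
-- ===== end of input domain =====

-- B is table-driven: a constant segment table (prefix, lo, hi) and a generic cursor-walking expander replace A's per-element branch; same return value.
-- ===== PORT A =====
def make_feature_names (n_features : Int) : List String :=
  (PySem.List.pyRange 0 n_features 1).foldl
    (fun names i =>
      if i < 768 then names ++ ["BERT dim " ++ PySem.Int.toStr i]
      else names ++ ["DistilBERT dim " ++ PySem.Int.toStr (i - 768)])
    []

-- ===== PORT B =====
-- the constant segments table of Source B: (prefix, lo, hi) with hi = none meaning open-ended
def pvSegments : List (String × Int × Option Int) :=
  [("BERT", 0, some 768), ("DistilBERT", 768, none)]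

-- Source B's label helper: '{} dim {}'.format(prefix, k) — ported by hand as plain
-- concatenation, exact because the segment prefixes contain no brace characters
def pvLabel (pfx : String) (k : Int) : String := pfx ++ " dim " ++ PySem.Int.toStr k

-- Source B's inner while loop: walk the cursor i from lo up to iEnd, appending labels
def pvEmit (pfx : String) (lo iEnd i : Int) (acc : List String) : List String :=
  if i < iEnd then pvEmit pfx lo iEnd (i + 1) (acc ++ [pvLabel pfx (i - lo)]) else acc
termination_by (iEnd - i).toNat
decreasing_by simp_wf; omega

def make_feature_names_alt (n_features : Int) : List String :=
  pvSegments.foldl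
    (fun names seg =>
      let e : Int := match seg.2.2 with
        | none => n_features
        | some hi => min hi n_features
      pvEmit seg.1 seg.2.1 e seg.2.1 names)
    []

-- ===== PRECONDITION & SPEC =====
def Spec_make_feature_names (n_features : Int) (out : List String) : Prop := out = make_feature_names_alt n_features
instance (n_features : Int) (out : List String) : Decidable (Spec_make_feature_names n_features out) := by unfold Spec_make_feature_names; infer_instance

-- ===== CLAIM (what is proved, stated in full; the proofs are below) =====
def Claim_equal_make_feature_names : Prop := ∀ (n_features : Int), Dom_make_feature_names n_features → Spec_make_feature_names n_features (make_feature_names n_features)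

-- ===== LEMMAS AND PROOFS =====
-- the expander emits exactly the mapped labels of its remaining range
theorem pvEmit_eq_fuel (pfx : String) (lo iEnd : Int) :
    ∀ (fuel : Nat) (i : Int) (acc : List String), (iEnd - i).toNat ≤ fuel →
    pvEmit pfx lo iEnd i acc
      = acc ++ (PySem.List.pyRange i iEnd 1).map (fun j => pvLabel pfx (j - lo)) := by
  intro fuel
  induction fuel with
  | zero =>
      intro i acc h
      rw [pvEmit, if_neg (by omega), PySem.List.pyRange_one_eq_nil (by omega)]
      simp
  | succ k ih =>
      intro i acc h
      by_cases hi : i < iEnd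
      · rw [pvEmit, if_pos hi, ih (i + 1) _ (by omega), PySem.List.pyRange_one_cons hi]
        simp
      · rw [pvEmit, if_neg hi, PySem.List.pyRange_one_eq_nil (by omega)]
        simp

theorem pvEmit_eq (pfx : String) (lo iEnd i : Int) (acc : List String) :
    pvEmit pfx lo iEnd i acc
      = acc ++ (PySem.List.pyRange i iEnd 1).map (fun j => pvLabel pfx (j - lo)) :=
  pvEmit_eq_fuel pfx lo iEnd (iEnd - i).toNat i acc le_rfl

-- ===== VERDICT (by name: the statement is the Claim_ definition above) =====
set_option maxRecDepth 2000 in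
theorem make_feature_names_spec : Claim_equal_make_feature_names := by
  intro n _
  unfold Spec_make_feature_names make_feature_names make_feature_names_alt pvSegments
  -- B's fold over the two-element table unfolds to two expander runs
  simp only [List.foldl_cons, List.foldl_nil, pvEmit_eq, List.nil_append]
  -- A's fold is a map over the full range
  have hfold :
      (PySem.List.pyRange 0 n 1).foldl
        (fun names i =>
          if i < 768 then names ++ ["BERT dim " ++ PySem.Int.toStr i]
          else names ++ ["DistilBERT dim " ++ PySem.Int.toStr (i - 768)]) []
      = (PySem.List.pyRange 0 n 1).map
          (fun i => if i < 768 then "BERT dim " ++ PySem.Int.toStr i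
                    else "DistilBERT dim " ++ PySem.Int.toStr (i - 768)) := by
    have := PySem.List.foldl_append_singleton_eq_map
      (f := fun i : Int => if i < 768 then "BERT dim " ++ PySem.Int.toStr i
                           else "DistilBERT dim " ++ PySem.Int.toStr (i - 768))
      (l := PySem.List.pyRange 0 n 1) (acc := [])
    simp only [List.nil_append] at this
    rw [← this]
    congr 1
    funext names i
    by_cases h : i < 768 <;> simp [h]
  rw [hfold]
  by_cases hn : n ≤ 768
  · have hmin : min (768:Int) n = n := min_eq_right hn
    rw [hmin, PySem.List.pyRange_one_eq_nil (a := (768:Int)) (b := n) hn]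
    simp only [List.map_nil, List.append_nil]
    apply List.map_congr_left
    intro i hi
    have := (PySem.List.mem_pyRange_one).mp hi
    simp [pvLabel, show i < 768 by omega]
  · have hmin : min (768:Int) n = 768 := min_eq_left (by omega)
    rw [hmin, PySem.List.pyRange_one_append 0 768 n (by omega) (by omega), List.map_append]
    have h1 : (PySem.List.pyRange 0 768 1).map
        (fun i => if i < 768 then "BERT dim " ++ PySem.Int.toStr i
                  else "DistilBERT dim " ++ PySem.Int.toStr (i - 768))
        = (PySem.List.pyRange 0 768 1).map (fun i => pvLabel "BERT" (i - 0)) := by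
      apply List.map_congr_left
      intro i hi
      have := (PySem.List.mem_pyRange_one).mp hi
      simp [pvLabel, show i < 768 by omega]
    have h2 : (PySem.List.pyRange 768 n 1).map
        (fun i => if i < 768 then "BERT dim " ++ PySem.Int.toStr i
                  else "DistilBERT dim " ++ PySem.Int.toStr (i - 768))
        = (PySem.List.pyRange 768 n 1).map (fun i => pvLabel "DistilBERT" (i - 768)) := by
      apply List.map_congr_left
      intro i hi
      have := (PySem.List.mem_pyRange_one).mp hi
      simp [pvLabel, show ¬ (i < 768) by omega]
    rw [h1, h2]
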